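-- pv_equiv track=rewrite | github.com/sakura12159/algorithms | 滑窗/2 定长倒序滑窗 查找给定哈希值的子串.py | func
-- ===== SOURCE A (Python) =====
-- def func(s: str, power: int, modulo: int, k: int, hashValue: int) -> str:
--     n = len(s)
--     # 用秦九韶算法计算 s[n-k:] 的哈希值
--     # ord(c) & 31 == ord(c) - 96，都将a-z映射到1-26
--     _hash = 0
--     for i in range(n - 1, n - k - 1, -1):
--         _hash = (_hash * power + (ord(s[i]) & 31)) % modulo
--     ans = n - k if _hash == hashValue else 0
--     pk = pow(power, k, modulo)  # 计算要从滑窗中删除的power ^ k项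
--     # 倒序滑窗
--     for i in range(n - k - 1, -1, -1):
--         # 计算新的哈希值
--         _hash = (_hash * power + (ord(s[i]) & 31) - pk * (ord(s[i + k]) & 31)) % modulo  # 加进入滑窗字符对应的项，减弹出滑窗字符对应的项
--         if _hash == hashValue:
--             ans = i
--     return s[ans: ans + k]
-- ===== SOURCE B (Python) =====
-- def func(s, power, modulo, k, hashValue):
--     n = len(s)
--     if not 0 <= k <= n:
--         raise ValueError("k must satisfy 0 <= k <= len(s)")
--     for i in range(n - k + 1):
--         h = 0
--         for c in reversed(s[i:i + k]):
--             h = (h * power + (ord(c) & 31)) % modulo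
--         if h == hashValue:
--             return s[i:i + k]
--     return s[0:k]
-- ===== Notes on version B (the rewrite author's own statement) =====
-- stated objective: simpler
-- what changed: Replaces A's backward incremental rolling-hash recurrence (seed hash of the last window, then pow(power,k,modulo)-based sliding updates recording the last match) with a plain ascending scan that recomputes each window's Horner hash independently and returns the first match, falling back to s[0:k]; B validates 0 <= k <= len(s) instead of relying on Python's negative-index wraparound.
-- outside the precondition, e.g. on func('aca', 4, 6, 5, 3): A returns 'ca', B raises ValueError
import Mathlib
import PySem

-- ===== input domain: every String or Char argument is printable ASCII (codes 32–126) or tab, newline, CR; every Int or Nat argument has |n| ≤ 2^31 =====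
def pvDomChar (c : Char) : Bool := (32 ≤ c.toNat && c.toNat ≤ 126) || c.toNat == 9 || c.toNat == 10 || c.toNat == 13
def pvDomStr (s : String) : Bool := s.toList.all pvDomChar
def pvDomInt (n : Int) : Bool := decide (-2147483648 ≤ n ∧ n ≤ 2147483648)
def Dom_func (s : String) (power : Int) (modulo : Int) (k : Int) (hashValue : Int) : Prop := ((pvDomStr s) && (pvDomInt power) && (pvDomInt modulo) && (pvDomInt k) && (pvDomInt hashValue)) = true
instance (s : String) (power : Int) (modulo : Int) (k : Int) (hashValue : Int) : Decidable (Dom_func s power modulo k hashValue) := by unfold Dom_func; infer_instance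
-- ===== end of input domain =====

-- B replaces A's backward rolling-hash recurrence by an ascending first-match scan that recomputes
-- each window's hash independently (simpler, not faster); equality is proved on Pre_ (0 ≤ k ≤ len s, modulo ≠ 0).

-- ===== PORT A =====
-- ord(c) & 31, shared by both ports
def pvVal (c : Char) : Int := PySem.Int.band (c.toNat : Int) 31

-- one Horner/mod step: (h * power + (ord(c) & 31)) % modulo
def pvStepC (power modulo : Int) (h : Int) (c : Char) : Int :=
  PySem.Int.mod (h * power + pvVal c) modulo

-- body of A's first loop (index form of pvStepC)
def pvStepA1 (cs : List Char) (power modulo : Int) (h : Int) (i : Int) : Int :=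
  pvStepC power modulo h (PySem.List.pyGetD cs i 'a')

-- body of A's second (sliding) loop, state = (_hash, ans)
def pvStepA2 (cs : List Char) (power modulo k hashValue pk : Int) (st : Int × Int) (i : Int) : Int × Int :=
  let h := PySem.Int.mod (st.1 * power + pvVal (PySem.List.pyGetD cs i 'a')
             - pk * pvVal (PySem.List.pyGetD cs (i + k) 'a')) modulo
  (h, if h = hashValue then i else st.2)

def func (s : String) (power : Int) (modulo : Int) (k : Int) (hashValue : Int) : String :=
  let cs := s.toList
  let n : Int := cs.length
  let h1 : Int := (PySem.List.pyRange (n - 1) (n - k - 1) (-1)).foldl (pvStepA1 cs power modulo) 0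
  let ans0 : Int := if h1 = hashValue then n - k else 0
  let pk : Int := PySem.Int.powMod power k.toNat modulo
  let st := (PySem.List.pyRange (n - k - 1) (-1) (-1)).foldl
              (pvStepA2 cs power modulo k hashValue pk) (h1, ans0)
  String.ofList (PySem.List.slice cs (some st.2) (some (st.2 + k)))

-- ===== PORT B =====
-- B's loop with early return: try each start index in order, recompute the window hash from scratch
def altGo (cs : List Char) (power modulo k hashValue : Int) : List Int → Option (List Char)
  | [] => none
  | i :: rest =>
    let w := PySem.List.slice cs (some i) (some (i + k))
    let h := w.reverse.foldl (pvStepC power modulo) 0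
    if h = hashValue then some w else altGo cs power modulo k hashValue rest

def func_alt (s : String) (power : Int) (modulo : Int) (k : Int) (hashValue : Int) : String :=
  let cs := s.toList
  let n : Int := cs.length
  if k < 0 ∨ n < k then ""  -- the Python raises ValueError here; the value is outside every claim
  else
    match altGo cs power modulo k hashValue (PySem.List.pyRange 0 (n - k + 1) 1) with
    | some w => String.ofList w
    | none => String.ofList (PySem.List.slice cs (some 0) (some k))

-- ===== PRECONDITION & SPEC =====
-- Pre_ excludes modulo = 0 and k < 0 (A raises ZeroDivisionError resp. IndexError/ValueError there)
-- and k > len(s), where A's value comes from Python's accidental negative-index wraparound.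
def Pre_func (s : String) (power : Int) (modulo : Int) (k : Int) (hashValue : Int) : Prop :=
  0 ≤ k ∧ k ≤ (s.toList.length : Int) ∧ modulo ≠ 0
instance (s : String) (power : Int) (modulo : Int) (k : Int) (hashValue : Int) : Decidable (Pre_func s power modulo k hashValue) := by unfold Pre_func; infer_instance

def pvWitness_func : String × Int × Int × Int × Int := ("leetcode", 7, 20, 2, 0)

def Spec_func (s : String) (power : Int) (modulo : Int) (k : Int) (hashValue : Int) (out : String) : Prop := out = func_alt s power modulo k hashValue
instance (s : String) (power : Int) (modulo : Int) (k : Int) (hashValue : Int) (out : String) : Decidable (Spec_func s power modulo k hashValue out) := by unfold Spec_func; infer_instance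

-- ===== CLAIM (what is proved, stated in full; the proofs are below) =====
def Claim_equal_func : Prop := ∀ (s : String) (power : Int) (modulo : Int) (k : Int) (hashValue : Int), Dom_func s power modulo k hashValue → Pre_func s power modulo k hashValue → Spec_func s power modulo k hashValue (func s power modulo k hashValue)

-- ===== LEMMAS AND PROOFS =====

-- the pure (un-reduced) polynomial hash of a window: sum of pvVal c_j * power^j
def pvHash (power : Int) (w : List Char) : Int := w.foldr (fun c h => h * power + pvVal c) 0

-- window of length K starting at j
def pvWin (cs : List Char) (K : Nat) (j : Nat) : List Char := (cs.drop j).take K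

-- "window j's hash matches hashValue"
def pvQ (cs : List Char) (power modulo hashValue : Int) (K : Nat) (j : Nat) : Bool :=
  decide (PySem.Int.mod (pvHash power (pvWin cs K j)) modulo = hashValue)

theorem pvMod_congr {m : Int} (hm : m ≠ 0) {a b : Int} (h : m ∣ (a - b)) :
    PySem.Int.mod a m = PySem.Int.mod b m := by
  have ha := PySem.Int.floordiv_mul_add_mod a m
  have hb := PySem.Int.floordiv_mul_add_mod b m
  have hd : m ∣ (PySem.Int.mod a m - PySem.Int.mod b m) := by
    have : PySem.Int.mod a m - PySem.Int.mod b m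
        = (a - b) - (PySem.Int.floordiv a m - PySem.Int.floordiv b m) * m := by ring_nf; omega
    rw [this]
    exact dvd_sub h (Dvd.dvd.mul_left (dvd_refl m) _)
  obtain ⟨c, hc⟩ := hd
  rcases lt_or_gt_of_ne hm with hneg | hpos
  · have b1 := PySem.Int.mod_neg_bounds (a := a) hneg
    have b2 := PySem.Int.mod_neg_bounds (a := b) hneg
    have hc0 : c = 0 := by nlinarith [b1.1, b1.2, b2.1, b2.2]
    rw [hc0, mul_zero] at hc; omega
  · have b1n := PySem.Int.mod_nonneg (a := a) hpos
    have b1l := PySem.Int.mod_lt (a := a) hpos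
    have b2n := PySem.Int.mod_nonneg (a := b) hpos
    have b2l := PySem.Int.mod_lt (a := b) hpos
    have hc0 : c = 0 := by nlinarith
    rw [hc0, mul_zero] at hc; omega

theorem pvHash_append_singleton (power : Int) (w : List Char) (c : Char) :
    pvHash power (w ++ [c]) = pvHash power w + pvVal c * power ^ w.length := by
  induction w with
  | nil => simp [pvHash]
  | cons d w ih =>
      simp only [List.cons_append, pvHash, List.foldr_cons, List.length_cons] at *
      rw [ih]; ring

theorem pvFold_mod {modulo : Int} (hm : modulo ≠ 0) (power : Int) (w : List Char) :
    w.reverse.foldl (pvStepC power modulo) 0 = PySem.Int.mod (pvHash power w) modulo := by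
  induction w with
  | nil => simp [pvHash, PySem.Int.mod, Int.zero_fmod]
  | cons c w ih =>
      rw [List.reverse_cons, List.foldl_append, ih]
      simp only [List.foldl_cons, List.foldl_nil, pvStepC, pvHash, List.foldr_cons]
      exact pvMod_congr hm (by
        have hfm := PySem.Int.floordiv_mul_add_mod (pvHash power w) modulo
        exact ⟨-(PySem.Int.floordiv (pvHash power w) modulo) * power, by
          unfold pvHash at *; linear_combination power * hfm⟩)

theorem pvDesc (cs : List Char) (power modulo : Int) (j t : Nat) (h : j + t ≤ cs.length) :
    ∀ h0 : Int,
      (PySem.List.pyRange ((j : Int) + (t : Int) - 1) ((j : Int) - 1) (-1)).foldl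
          (pvStepA1 cs power modulo) h0
        = ((cs.drop j).take t).reverse.foldl (pvStepC power modulo) h0 := by
  induction t with
  | zero =>
      intro h0
      rw [PySem.List.pyRange_neg_one_eq_nil (by omega)]
      simp
  | succ t ih =>
      intro h0
      rw [show ((j : Int) + ((t:Nat)+1 : Nat) - 1) = (j : Int) + (t : Int) by push_cast; ring]
      rw [PySem.List.pyRange_neg_one_cons (by omega)]
      have hidx : j + t < cs.length := by omega
      have htake : (cs.drop j).take (t+1) = (cs.drop j).take t ++ [cs[j+t]] := by
        rw [List.take_add_one]
        congr 1
        rw [List.getElem?_drop, List.getElem?_eq_getElem hidx]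
        simp
      rw [htake, List.reverse_append, List.reverse_singleton, List.singleton_append,
          List.foldl_cons, List.foldl_cons]
      have hstep : pvStepA1 cs power modulo h0 ((j : Int) + (t : Int))
          = pvStepC power modulo h0 cs[j+t] := by
        unfold pvStepA1
        rw [show ((j : Int) + (t : Int)) = ((j + t : Nat) : Int) by push_cast; ring]
        rw [PySem.List.pyGetD_natCast]
        rw [List.getD_eq_getElem _ _ hidx]
      rw [hstep]
      rw [show ((j : Int) + (t : Int) - 1) = (j : Int) + (t : Int) - 1 from rfl]
      have := ih (by omega) (pvStepC power modulo h0 cs[j+t])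
      rw [show ((j : Int) + ((t:Nat) : Int) - 1) = (j:Int) + (t:Int) - 1 from rfl] at this
      exact this

theorem pvRoll (cs : List Char) (power : Int) (K : Nat) (i : Nat)
    (h : i + K < cs.length) :
    pvHash power (pvWin cs K (i + 1)) * power + pvVal (cs.getD i 'a')
      - power ^ K * pvVal (cs.getD (i + K) 'a')
      = pvHash power (pvWin cs K i) := by
  cases K with
  | zero => simp [pvWin, pvHash]
  | succ K' =>
    have hi : i < cs.length := by omega
    have hwin_i : pvWin cs (K' + 1) i = cs[i] :: (cs.drop (i+1)).take K' := by
      unfold pvWin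
      rw [List.drop_eq_getElem_cons hi, List.take_succ_cons]
    have hwin_i1 : pvWin cs (K' + 1) (i + 1) = (cs.drop (i+1)).take K' ++ [cs[i + (K' + 1)]] := by
      unfold pvWin
      rw [List.take_add_one]
      congr 1
      rw [List.getElem?_drop, show i + 1 + K' = i + (K' + 1) from by omega,
          List.getElem?_eq_getElem h]
      simp
    have hmidlen : ((cs.drop (i+1)).take K').length = K' := by
      rw [List.length_take, List.length_drop]; omega
    rw [hwin_i, hwin_i1, pvHash_append_singleton, hmidlen]
    simp only [pvHash, List.foldr_cons]
    rw [List.getD_eq_getElem _ _ hi, List.getD_eq_getElem _ _ h]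
    rw [pow_succ]
    ring

theorem pvLoop2 (cs : List Char) (power modulo k hashValue : Int)
    (hm : modulo ≠ 0) (hk : 0 ≤ k) :
    ∀ (t : Nat), t + k.toNat ≤ cs.length → ∀ a0 : Int,
      (PySem.List.pyRange ((t : Int) - 1) (-1) (-1)).foldl
          (pvStepA2 cs power modulo k hashValue (PySem.Int.powMod power k.toNat modulo))
          (PySem.Int.mod (pvHash power (pvWin cs k.toNat t)) modulo, a0)
        = (PySem.Int.mod (pvHash power (pvWin cs k.toNat 0)) modulo,
           match (List.range t).find? (pvQ cs power modulo hashValue k.toNat) with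
           | some j => (j : Int)
           | none => a0) := by
  intro t
  induction t with
  | zero =>
      intro _ a0
      rw [PySem.List.pyRange_neg_one_eq_nil (by norm_num)]
      simp
  | succ t ih =>
      intro hlen a0
      rw [show (((t + 1 : Nat) : Int) - 1) = (t : Int) by push_cast; ring]
      rw [PySem.List.pyRange_neg_one_cons (by omega)]
      rw [List.foldl_cons]
      have hH := PySem.Int.floordiv_mul_add_mod (pvHash power (pvWin cs k.toNat (t + 1))) modulo
      have hP := PySem.Int.floordiv_mul_add_mod (power ^ k.toNat) modulo
      have hstep : pvStepA2 cs power modulo k hashValue (PySem.Int.powMod power k.toNat modulo)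
          (PySem.Int.mod (pvHash power (pvWin cs k.toNat (t + 1))) modulo, a0) ((t : Nat) : Int)
          = (PySem.Int.mod (pvHash power (pvWin cs k.toNat t)) modulo,
             if pvQ cs power modulo hashValue k.toNat t then ((t : Nat) : Int) else a0) := by
        unfold pvStepA2
        have hidx2 : ((t : Nat) : Int) + k = ((t + k.toNat : Nat) : Int) := by push_cast; omega
        rw [hidx2, PySem.List.pyGetD_natCast, PySem.List.pyGetD_natCast]
        have hmodeq : PySem.Int.mod
            (PySem.Int.mod (pvHash power (pvWin cs k.toNat (t + 1))) modulo * power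
              + pvVal (cs.getD t 'a')
              - PySem.Int.powMod power k.toNat modulo * pvVal (cs.getD (t + k.toNat) 'a')) modulo
            = PySem.Int.mod (pvHash power (pvWin cs k.toNat t)) modulo := by
          have h1 : PySem.Int.powMod power k.toNat modulo
              = PySem.Int.mod (power ^ k.toNat) modulo := rfl
          rw [h1]
          have hcong := pvMod_congr hm (m := modulo)
            (a := PySem.Int.mod (pvHash power (pvWin cs k.toNat (t + 1))) modulo * power
              + pvVal (cs.getD t 'a')
              - PySem.Int.mod (power ^ k.toNat) modulo * pvVal (cs.getD (t + k.toNat) 'a'))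
            (b := pvHash power (pvWin cs k.toNat (t + 1)) * power + pvVal (cs.getD t 'a')
              - power ^ k.toNat * pvVal (cs.getD (t + k.toNat) 'a'))
            (by
              refine ⟨-(PySem.Int.floordiv (pvHash power (pvWin cs k.toNat (t + 1))) modulo) * power
                + PySem.Int.floordiv (power ^ k.toNat) modulo * pvVal (cs.getD (t + k.toNat) 'a'), ?_⟩
              linear_combination power * hH - pvVal (cs.getD (t + k.toNat) 'a') * hP)
          rw [hcong, pvRoll cs power k.toNat t (by omega)]
        simp only [hmodeq, pvQ, decide_eq_true_eq]
      rw [hstep]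
      rw [ih (by omega) _]
      congr 1
      rw [List.range_succ, List.find?_append]
      cases hfind : (List.range t).find? (pvQ cs power modulo hashValue k.toNat) with
      | some j => simp
      | none =>
          simp only [Option.none_or]
          by_cases hq : pvQ cs power modulo hashValue k.toNat t
          · simp [List.find?, hq]
          · simp [List.find?, hq]

theorem pvAltGo (cs : List Char) (power modulo k hashValue : Int)
    (hm : modulo ≠ 0) (hk : 0 ≤ k) :
    ∀ (t j0 : Nat),
      altGo cs power modulo k hashValue (PySem.List.pyRange (j0 : Int) ((j0 : Int) + (t : Int)) 1)
        = (((List.range t).map (j0 + ·)).find? (pvQ cs power modulo hashValue k.toNat)).map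
            (pvWin cs k.toNat) := by
  intro t
  induction t with
  | zero =>
      intro j0
      rw [show ((j0 : Int) + ((0 : Nat) : Int)) = (j0 : Int) by push_cast; ring]
      rw [PySem.List.pyRange_one_eq_nil le_rfl]
      simp [altGo]
  | succ t ih =>
      intro j0
      rw [PySem.List.pyRange_one_cons (by push_cast; omega)]
      have hw : PySem.List.slice cs (some ((j0 : Nat) : Int)) (some (((j0 : Nat) : Int) + k))
          = pvWin cs k.toNat j0 := by
        rw [PySem.List.slice_toNat cs (Int.natCast_nonneg j0) (by omega)]
        rw [show (((j0 : Nat) : Int) + k).toNat = j0 + k.toNat from by omega]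
        simp only [Int.toNat_natCast, pvWin, Nat.add_sub_cancel_left]
      simp only [altGo, hw]
      rw [pvFold_mod hm]
      have hrest : (j0 : Int) + 1 = ((j0 + 1 : Nat) : Int) := by push_cast; ring
      have hrest2 : (j0 : Int) + ((t + 1 : Nat) : Int) = ((j0 + 1 : Nat) : Int) + ((t : Nat) : Int) := by
        push_cast; ring
      rw [hrest2, hrest, ih (j0 + 1)]
      have hmap : (List.range (t + 1)).map (j0 + ·)
          = j0 :: (List.range t).map ((j0 + 1) + ·) := by
        rw [List.range_succ_eq_map, List.map_cons, List.map_map]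
        congr 1
        apply List.map_congr_left
        intro d _
        simp only [Function.comp_apply]
        omega
      rw [hmap]
      by_cases hq : pvQ cs power modulo hashValue k.toNat j0
      · have : PySem.Int.mod (pvHash power (pvWin cs k.toNat j0)) modulo = hashValue := by
          simpa [pvQ] using hq
        simp [List.find?, hq, this]
      · have : ¬ PySem.Int.mod (pvHash power (pvWin cs k.toNat j0)) modulo = hashValue := by
          simpa [pvQ] using hq
        simp [List.find?, hq, this]

-- ===== VERDICT (by name: the statement is the Claim_ definition above) =====
theorem func_spec : Claim_equal_func := by
  unfold Claim_equal_func
  intro s power modulo k hashValue _ hpre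
  obtain ⟨hk, hkn, hm⟩ := hpre
  unfold Spec_func func func_alt
  simp only []
  rw [if_neg (by omega : ¬(k < 0 ∨ (s.toList.length : Int) < k))]
  have e1 : ((s.toList.length : Int) - 1)
      = ((s.toList.length - k.toNat : Nat) : Int) + ((k.toNat : Nat) : Int) - 1 := by omega
  have e2 : ((s.toList.length : Int) - k - 1) = ((s.toList.length - k.toNat : Nat) : Int) - 1 := by
    omega
  have e3 : ((s.toList.length : Int) - k) = ((s.toList.length - k.toNat : Nat) : Int) := by omega
  rw [e1, e2, e3]
  rw [pvDesc s.toList power modulo (s.toList.length - k.toNat) k.toNat (by omega) 0]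
  rw [pvFold_mod hm]
  rw [show (s.toList.drop (s.toList.length - k.toNat)).take k.toNat
      = pvWin s.toList k.toNat (s.toList.length - k.toNat) from rfl]
  rw [pvLoop2 s.toList power modulo k hashValue hm hk (s.toList.length - k.toNat) (by omega)]
  have hB := pvAltGo s.toList power modulo k hashValue hm hk (s.toList.length - k.toNat + 1) 0
  simp only [Nat.cast_zero, zero_add, Nat.cast_add, Nat.cast_one, List.map_id'] at hB
  rw [hB]
  have hsplit : (List.range (s.toList.length - k.toNat + 1)).find?
        (pvQ s.toList power modulo hashValue k.toNat)
      = ((List.range (s.toList.length - k.toNat)).find?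
          (pvQ s.toList power modulo hashValue k.toNat)).or
        ([s.toList.length - k.toNat].find? (pvQ s.toList power modulo hashValue k.toNat)) := by
    rw [List.range_succ, List.find?_append]
  cases hf : (List.range (s.toList.length - k.toNat)).find?
      (pvQ s.toList power modulo hashValue k.toNat) with
  | some j =>
      simp only [hf, Option.some_or] at hsplit ⊢
      rw [hsplit]
      simp only [Option.map_some]
      rw [PySem.List.slice_toNat s.toList (Int.natCast_nonneg j)
        (add_nonneg (Int.natCast_nonneg j) hk)]
      rw [show (((j : Nat) : Int) + k).toNat = j + k.toNat from by omega]
      simp only [Int.toNat_natCast, Nat.add_sub_cancel_left]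
      rfl
  | none =>
      simp only [hf, Option.none_or] at hsplit ⊢
      rw [hsplit]
      by_cases hq : PySem.Int.mod
          (pvHash power (pvWin s.toList k.toNat (s.toList.length - k.toNat))) modulo = hashValue
      · rw [if_pos hq]
        have hqd : pvQ s.toList power modulo hashValue k.toNat (s.toList.length - k.toNat)
            = true := decide_eq_true hq
        rw [List.find?_cons_of_pos hqd]
        simp only [Option.map_some]
        rw [PySem.List.slice_toNat s.toList (Int.natCast_nonneg _)
          (add_nonneg (Int.natCast_nonneg _) hk)]
        rw [show (((s.toList.length - k.toNat : Nat) : Int) + k).toNat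
            = (s.toList.length - k.toNat) + k.toNat from by omega]
        simp only [Int.toNat_natCast, Nat.add_sub_cancel_left]
        rfl
      · rw [if_neg hq]
        have hqd : pvQ s.toList power modulo hashValue k.toNat (s.toList.length - k.toNat)
            = false := by
          simpa [pvQ] using hq
        rw [List.find?_cons_of_neg (by simpa using hqd), List.find?_nil]
        simp only [Option.map_none]
        rw [zero_add]
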